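-- pv_equiv track=rewrite | github.com/asarkar255/AFLE_DDIC | app.py | iter_statements_with_offsets
-- ===== SOURCE A (Python) =====
-- def iter_statements_with_offsets(src: str):
--     buf = []; start_off = 0
--     for i, ch in enumerate(src):
--         buf.append(ch)
--         if ch == ".":
--             stmt = "".join(buf)
--             yield stmt, start_off, i + 1
--             buf = []; start_off = i + 1
--     if buf:
--         yield "".join(buf), start_off, len(src)
-- ===== SOURCE B (Python) =====
-- def iter_statements_with_offsets(src: str):
--     start = 0
--     n = len(src)
--     while True:
--         idx = src.find(".", start)
--         if idx == -1:
--             if start < n: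
--                 yield src[start:], start, n
--             return
--         yield src[start:idx + 1], start, idx + 1
--         start = idx + 1
-- ===== Notes on version B (the rewrite author's own statement) =====
-- stated objective: faster
-- what changed: Replaces the char-by-char buffer accumulation with a find-based scan that jumps from period to period via str.find and slices each statement out, keeping only a start offset.
import Mathlib
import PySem

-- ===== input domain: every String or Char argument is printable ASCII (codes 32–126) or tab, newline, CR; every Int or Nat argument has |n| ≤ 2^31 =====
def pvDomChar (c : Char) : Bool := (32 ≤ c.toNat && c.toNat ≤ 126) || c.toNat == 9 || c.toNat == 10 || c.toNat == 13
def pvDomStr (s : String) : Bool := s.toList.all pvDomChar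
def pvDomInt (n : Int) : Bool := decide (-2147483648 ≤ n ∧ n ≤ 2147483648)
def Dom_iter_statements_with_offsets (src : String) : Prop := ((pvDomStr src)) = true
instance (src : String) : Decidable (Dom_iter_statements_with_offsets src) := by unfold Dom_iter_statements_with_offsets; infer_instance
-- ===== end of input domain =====

-- B replaces A's char-by-char buffer loop with a find-based scan that jumps between periods;
-- equivalence of the yielded (statement, start, end) triples is proved on all inputs.

-- ===== PORT A =====
-- the for-loop over enumerate(src): state = (buf, start_off, accumulated output), i is the index
def pvGoA (cs : List Char) (buf : List Char) (start : Nat) (i : Nat) :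
    List (String × Int × Int) :=
  match cs with
  | [] => if buf = [] then [] else [(String.ofList buf, (start : Int), (i : Int))]
  | c :: rest =>
      let buf' := buf ++ [c]
      if c = '.' then
        (String.ofList buf', (start : Int), ((i + 1 : Nat) : Int)) :: pvGoA rest [] (i + 1) (i + 1)
      else
        pvGoA rest buf' start (i + 1)

def iter_statements_with_offsets (src : String) : List (String × Int × Int) :=
  pvGoA src.toList [] 0 0

-- ===== PORT B =====
-- src.find('.', start) on the remaining suffix: none = -1, some (pre, post) = split at the
-- first '.', so the found index is start + pre.length and src[start:idx+1] = pre ++ ['.']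
def pvFindDot (cs : List Char) : Option (List Char × List Char) :=
  match cs with
  | [] => none
  | c :: rest =>
      if c = '.' then some ([], rest)
      else (pvFindDot rest).map (fun pq => (c :: pq.1, pq.2))

theorem pvFindDot_post_lt (cs pre post : List Char)
    (h : pvFindDot cs = some (pre, post)) : post.length < cs.length := by
  induction cs generalizing pre post with
  | nil => simp [pvFindDot] at h
  | cons c rest ih =>
    by_cases hc : c = '.'
    · simp [pvFindDot, hc] at h
      simp [← h.2]
    · cases hr : pvFindDot rest with
      | none => simp [pvFindDot, hc, hr] at h
      | some pq =>
        simp [pvFindDot, hc, hr] at h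
        have := ih pq.1 pq.2 (by rw [hr])
        simp [← h.2]
        omega

-- the while loop: cs is the unprocessed suffix src[start:]
def pvGoB (cs : List Char) (start : Nat) : List (String × Int × Int) :=
  match hfd : pvFindDot cs with
  | none =>
      if cs = [] then []
      else [(String.ofList cs, (start : Int), ((start + cs.length : Nat) : Int))]
  | some (pre, post) =>
      (String.ofList (pre ++ ['.']), (start : Int), ((start + pre.length + 1 : Nat) : Int)) ::
        pvGoB post (start + pre.length + 1)
  termination_by cs.length
  decreasing_by exact pvFindDot_post_lt _ _ _ hfd

def iter_statements_with_offsets_alt (src : String) : List (String × Int × Int) :=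
  pvGoB src.toList 0

-- ===== PRECONDITION & SPEC =====
def Spec_iter_statements_with_offsets (src : String) (out : List (String × Int × Int)) : Prop := out = iter_statements_with_offsets_alt src
instance (src : String) (out : List (String × Int × Int)) : Decidable (Spec_iter_statements_with_offsets src out) := by unfold Spec_iter_statements_with_offsets; infer_instance

-- ===== CLAIM (what is proved, stated in full; the proofs are below) =====
def Claim_equal_iter_statements_with_offsets : Prop := ∀ (src : String), Dom_iter_statements_with_offsets src → Spec_iter_statements_with_offsets src (iter_statements_with_offsets src)

-- ===== LEMMAS AND PROOFS =====

theorem pvFindDot_append_nodot (buf cs : List Char) (h : '.' ∉ buf) :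
    pvFindDot (buf ++ cs) = (pvFindDot cs).map (fun pq => (buf ++ pq.1, pq.2)) := by
  induction buf with
  | nil => cases hfd : pvFindDot cs <;> simp [hfd]
  | cons b rest ih =>
    have hb : b ≠ '.' := fun hb => h (by simp [hb])
    have hrest : '.' ∉ rest := fun hr => h (by simp [hr])
    simp only [List.cons_append, pvFindDot, if_neg hb, ih hrest]
    cases pvFindDot cs <;> simp

theorem pvGoB_none (cs : List Char) (start : Nat) (h : pvFindDot cs = none) :
    pvGoB cs start =
      (if cs = [] then []
       else [(String.ofList cs, (start : Int), ((start + cs.length : Nat) : Int))]) := by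
  rw [pvGoB]; split <;> simp_all

theorem pvGoB_some (cs pre post : List Char) (start : Nat)
    (h : pvFindDot cs = some (pre, post)) :
    pvGoB cs start =
      (String.ofList (pre ++ ['.']), (start : Int), ((start + pre.length + 1 : Nat) : Int)) ::
        pvGoB post (start + pre.length + 1) := by
  rw [pvGoB]; split <;> simp_all

-- loop invariant: buf = src[start:i] contains no '.', i = start + buf.length
theorem pvGoA_eq_pvGoB (cs buf : List Char) (start : Nat) (h : '.' ∉ buf) :
    pvGoA cs buf start (start + buf.length) = pvGoB (buf ++ cs) start := by
  induction cs generalizing buf start with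
  | nil =>
    have hn : pvFindDot (buf ++ []) = none := by
      rw [pvFindDot_append_nodot buf [] h]; simp [pvFindDot]
    rw [pvGoB_none _ _ hn]
    simp [pvGoA]
  | cons c rest ih =>
    by_cases hc : c = '.'
    · subst hc
      have hfd : pvFindDot (buf ++ '.' :: rest) = some (buf, rest) := by
        rw [pvFindDot_append_nodot buf _ h]; simp [pvFindDot]
      rw [pvGoB_some _ _ _ _ hfd]
      have hIH := ih [] (start + buf.length + 1) (by simp)
      simp only [List.length_nil, Nat.add_zero, List.nil_append] at hIH
      simp only [pvGoA, if_true]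
      rw [hIH]
    · have h' : '.' ∉ buf ++ [c] := by
        intro hm; rcases List.mem_append.mp hm with hm | hm
        · exact h hm
        · simp at hm; exact hc hm.symm
      have hIH : pvGoA rest (buf ++ [c]) start (start + buf.length + 1) =
          pvGoB ((buf ++ [c]) ++ rest) start := by
        have := ih (buf ++ [c]) start h'
        simpa [Nat.add_assoc] using this
      simp only [pvGoA, if_neg hc]
      rw [show buf ++ c :: rest = (buf ++ [c]) ++ rest by simp]
      exact hIH

-- ===== VERDICT (by name: the statement is the Claim_ definition above) =====
theorem iter_statements_with_offsets_spec : Claim_equal_iter_statements_with_offsets := by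
  intro src _
  unfold Spec_iter_statements_with_offsets iter_statements_with_offsets iter_statements_with_offsets_alt
  have := pvGoA_eq_pvGoB src.toList [] 0 (by simp)
  simpa using this
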